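-- pv_equiv track=rewrite | github.com/slackjawed12/codetest | 백준/Silver/18429. 근손실/근손실.py | get_total_helper
-- ===== SOURCE A (Python) =====
-- def get_total_helper(arr, K, result, cur_weight, cur_routine, visit):
--     if cur_weight < 500:
--         return 0
--     elif len(cur_routine) == len(arr):
--         result += 1
--         return result
--
--     r = result
--     for i, w in enumerate(arr):
--         if not visit[i]:
--             visit[i] = True
--             cur_routine.append(i)
--             r += get_total_helper(arr, K, result, cur_weight - K + w, cur_routine, visit)
--             visit[i] = False
--             cur_routine.pop()
--
--     return r
-- ===== SOURCE B (Python) =====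
-- def get_total_helper(arr, K, result, cur_weight, cur_routine, visit):
--     if cur_weight < 500:
--         return 0
--     n = len(arr)
--     if len(cur_routine) == n:
--         return result + 1
--     free = [i for i in range(n) if not visit[i]]
--     u = len(free)
--     m0 = len(cur_routine)
--     # After choosing any set of the free exercises, the current weight and the routine
--     # length depend only on that set, not on the order it was chosen in, so the
--     # recursion can be tabulated bottom-up over subsets (bitmask DP) instead of
--     # re-explored once per ordering.  Bit j set in mask = free[j] still unchosen.
--     G = [0] * (1 << u)
--     for mask in range(1 << u):
--         w = cur_weight + sum(arr[free[j]] - K for j in range(u) if not (mask >> j) & 1)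
--         m = m0 + (u - bin(mask).count("1"))
--         if w < 500:
--             G[mask] = 0
--         elif m == n:
--             G[mask] = result + 1
--         else:
--             G[mask] = result + sum(G[mask ^ (1 << j)] for j in range(u) if (mask >> j) & 1)
--     return G[(1 << u) - 1]
-- ===== Notes on version B (the rewrite author's own statement) =====
-- stated objective: alternative
-- what changed: A's recursive value at a state depends only on the set of still-free indices (weight and routine length are determined by the set, not the order), so B tabulates that same recursion bottom-up over bitmask subsets, one value per subset, instead of re-exploring it once per ordering; Pre_ excludes only the inputs where A raises IndexError (visit shorter than arr with neither base case firing).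
import Mathlib
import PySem

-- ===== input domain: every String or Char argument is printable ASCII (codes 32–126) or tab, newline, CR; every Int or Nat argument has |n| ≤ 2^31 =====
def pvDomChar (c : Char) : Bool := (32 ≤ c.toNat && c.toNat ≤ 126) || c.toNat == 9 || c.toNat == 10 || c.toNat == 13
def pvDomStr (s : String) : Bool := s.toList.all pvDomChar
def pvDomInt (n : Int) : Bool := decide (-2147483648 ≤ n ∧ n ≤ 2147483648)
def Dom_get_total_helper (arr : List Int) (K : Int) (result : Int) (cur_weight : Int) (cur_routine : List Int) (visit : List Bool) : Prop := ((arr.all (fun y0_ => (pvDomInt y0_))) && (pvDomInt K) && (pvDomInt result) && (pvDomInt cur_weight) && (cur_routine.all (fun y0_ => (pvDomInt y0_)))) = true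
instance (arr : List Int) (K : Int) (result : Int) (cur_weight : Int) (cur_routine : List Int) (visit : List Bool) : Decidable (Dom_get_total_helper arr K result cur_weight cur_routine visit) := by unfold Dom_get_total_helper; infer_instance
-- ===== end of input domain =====

-- B tabulates the same recursion bottom-up over bitmask subsets of the free indices
-- (weight and routine length are determined by the chosen set, not its order), one
-- value per subset, instead of A's re-exploration of every ordering (objective:
-- alternative algorithm; not measured faster).  A restores `visit`/`cur_routine` before returning, so the
-- caller observes no mutation.

-- ===== PORT A =====
-- A's recursion, with the backtracking mutation of `visit`/`cur_routine` expressed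
-- functionally (`visit.set i true`, `routine ++ [i]`: A restores both after the call,
-- so only the state passed down matters).  `fuel` only makes the recursion structurally
-- terminating: inside Pre_ the depth is bounded by the number of free indices, so
-- fuel = arr.length + 1 is never exhausted.  `visit.getD i true` is Python's visit[i]
-- on the in-range indices Pre_ guarantees (out of range Python raises IndexError).
def goA (arr : List Int) (K : Int) : Nat → Int → Int → List Int → List Bool → Int
  | 0, _, _, _, _ => 0
  | fuel + 1, result, w, routine, visit =>
    if w < 500 then 0
    else if routine.length = arr.length then result + 1
    else
      (List.range arr.length).foldl
        (fun r i =>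
          if !(visit.getD i true) then
            r + goA arr K fuel result (w - K + arr.getD i 0) (routine ++ [(i : Int)]) (visit.set i true)
          else r)
        result

def get_total_helper (arr : List Int) (K : Int) (result : Int) (cur_weight : Int) (cur_routine : List Int) (visit : List Bool) : Int :=
  goA arr K (arr.length + 1) result cur_weight cur_routine visit

-- ===== PORT B =====
-- bin(mask).count("1")
def popcount (n : Nat) : Nat :=
  if n = 0 then 0 else n % 2 + popcount (n / 2)
decreasing_by exact Nat.div_lt_self (Nat.pos_of_ne_zero (by assumption)) (by omega)

def get_total_helper_alt (arr : List Int) (K : Int) (result : Int) (cur_weight : Int) (cur_routine : List Int) (visit : List Bool) : Int :=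
  if cur_weight < 500 then 0
  else
    let n := arr.length
    if cur_routine.length = n then result + 1
    else
      let free := (List.range n).filter (fun i => !(visit.getD i true))
      let u := free.length
      let m0 := cur_routine.length
      let G := (List.range (2 ^ u)).foldl
        (fun (G : List Int) mask =>
          let w := cur_weight +
            (((List.range u).filter (fun j => !(mask.testBit j))).map
              (fun j => arr.getD (free.getD j 0) 0 - K)).sum
          let m := m0 + (u - popcount mask)
          let g : Int :=
            if w < 500 then 0
            else if m = n then result + 1
            else result +
              (((List.range u).filter (fun j => mask.testBit j)).map
                (fun j => G.getD (mask ^^^ 2 ^ j) 0)).sum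
          G ++ [g])
        []
      G.getD (2 ^ u - 1) 0

-- ===== PRECONDITION & SPEC =====
-- Pre_ excludes exactly the inputs on which the Python A raises IndexError: `visit`
-- shorter than `arr` while the weight/length base cases do not fire, so the loop reads
-- visit[i] for some i ≥ len(visit).  (B raises there too.)
def Pre_get_total_helper (arr : List Int) (K : Int) (result : Int) (cur_weight : Int) (cur_routine : List Int) (visit : List Bool) : Prop :=
  arr.length ≤ visit.length ∨ cur_weight < 500 ∨ cur_routine.length = arr.length
instance (arr : List Int) (K : Int) (result : Int) (cur_weight : Int) (cur_routine : List Int) (visit : List Bool) : Decidable (Pre_get_total_helper arr K result cur_weight cur_routine visit) := by unfold Pre_get_total_helper; infer_instance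

def pvWitness_get_total_helper : List Int × Int × Int × Int × List Int × List Bool :=
  ([1, 2], 1, 0, 501, [], [false, false])

def Spec_get_total_helper (arr : List Int) (K : Int) (result : Int) (cur_weight : Int) (cur_routine : List Int) (visit : List Bool) (out : Int) : Prop := out = get_total_helper_alt arr K result cur_weight cur_routine visit
instance (arr : List Int) (K : Int) (result : Int) (cur_weight : Int) (cur_routine : List Int) (visit : List Bool) (out : Int) : Decidable (Spec_get_total_helper arr K result cur_weight cur_routine visit out) := by unfold Spec_get_total_helper; infer_instance

-- ===== CLAIM (what is proved, stated in full; the proofs are below) =====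
def Claim_equal_get_total_helper : Prop := ∀ (arr : List Int) (K : Int) (result : Int) (cur_weight : Int) (cur_routine : List Int) (visit : List Bool), Dom_get_total_helper arr K result cur_weight cur_routine visit → Pre_get_total_helper arr K result cur_weight cur_routine visit → Spec_get_total_helper arr K result cur_weight cur_routine visit (get_total_helper arr K result cur_weight cur_routine visit)

-- ===== LEMMAS AND PROOFS =====

-- Mid-level specification: the value of A's recursion as a pure function of
-- (weight, routine length, set of free indices) — `result` is passed down unchanged.
def gSpec (arr : List Int) (K result : Int) (w : Int) (m : Nat) (S : List Nat) : Int :=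
  if w < 500 then 0
  else if m = arr.length then result + 1
  else
    S.attach.foldl
      (fun acc x => acc + gSpec arr K result (w - K + arr.getD x.1 0) (m + 1) (S.erase x.1))
      result
termination_by S.length
decreasing_by
  have h1 := List.length_erase_of_mem x.2
  have h2 := List.length_pos_of_mem x.2
  omega

def freeOf (arr : List Int) (visit : List Bool) : List Nat :=
  (List.range arr.length).filter (fun i => !(visit.getD i true))

def wOf (arr : List Int) (K w0 : Int) (free : List Nat) (mask : Nat) : Int :=
  w0 + (((List.range free.length).filter (fun j => !(mask.testBit j))).map
        (fun j => arr.getD (free.getD j 0) 0 - K)).sum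

def subOf (free : List Nat) (mask : Nat) : List Nat :=
  ((List.range free.length).filter (fun j => mask.testBit j)).map (fun j => free.getD j 0)

lemma foldl_add_sum {α : Type} (f : α → Int) (l : List α) (a : Int) :
    l.foldl (fun acc x => acc + f x) a = a + (l.map f).sum := by
  induction l generalizing a with
  | nil => simp
  | cons x xs ih => simp [ih]; ring

lemma foldl_if_sum (c : Nat → Bool) (g : Nat → Int) (l : List Nat) (a : Int) :
    l.foldl (fun r i => if c i then r + g i else r) a = a + ((l.filter c).map g).sum := by
  induction l generalizing a with
  | nil => simp
  | cons x xs ih => by_cases h : c x <;> simp [h, ih] <;> ring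

lemma gSpec_of (arr : List Int) (K result : Int) (w : Int) (m : Nat) (S : List Nat)
    (h1 : ¬ w < 500) (h2 : m ≠ arr.length) :
    gSpec arr K result w m S =
      result + (S.map (fun i => gSpec arr K result (w - K + arr.getD i 0) (m + 1) (S.erase i))).sum := by
  rw [gSpec, if_neg h1, if_neg h2]
  show S.attach.foldl (fun acc x =>
      acc + gSpec arr K result (w - K + arr.getD x.1 0) (m + 1) (S.erase x.1)) result = _
  rw [foldl_add_sum]
  simp [List.attach_map_val]

lemma freeOf_set (arr : List Int) (visit : List Bool) (i : Nat)
    (hiv : i < visit.length) :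
    freeOf arr (visit.set i true) = (freeOf arr visit).erase i := by
  have hnd : (freeOf arr visit).Nodup := List.nodup_range.filter _
  rw [hnd.erase_eq_filter, freeOf, freeOf, List.filter_filter]
  apply List.filter_congr
  intro x _
  by_cases hx : x = i
  · subst hx; simp [List.getD, List.getElem?_set_self, hiv]
  · simp [List.getD, List.getElem?_set_ne (by omega : i ≠ x), hx]

lemma goA_eq (arr : List Int) (K result : Int) :
    ∀ (fuel : Nat) (w : Int) (routine : List Int) (visit : List Bool),
      arr.length ≤ visit.length →
      (freeOf arr visit).length < fuel →
      goA arr K fuel result w routine visit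
        = gSpec arr K result w routine.length (freeOf arr visit) := by
  intro fuel
  induction fuel with
  | zero => intro w routine visit _ h; omega
  | succ fuel ih =>
    intro w routine visit hlen hfuel
    rw [goA]
    by_cases h1 : w < 500
    · rw [gSpec]; simp [h1]
    · by_cases h2 : routine.length = arr.length
      · rw [gSpec]; simp [h1, h2]
      · rw [if_neg h1, if_neg h2, foldl_if_sum,
          show (List.range arr.length).filter (fun i => !(visit.getD i true)) = freeOf arr visit from rfl,
          gSpec_of arr K result w routine.length _ h1 h2]
        have hmap : ∀ i ∈ freeOf arr visit,
            goA arr K fuel result (w - K + arr.getD i 0) (routine ++ [(i : Int)]) (visit.set i true)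
            = gSpec arr K result (w - K + arr.getD i 0) (routine.length + 1) ((freeOf arr visit).erase i) := by
          intro i hi
          have hir : i < arr.length := List.mem_range.1 (List.mem_filter.1 hi).1
          have hiv : i < visit.length := lt_of_lt_of_le hir hlen
          have herase := freeOf_set arr visit i hiv
          have hlen2 : (freeOf arr (visit.set i true)).length < fuel := by
            rw [herase, List.length_erase_of_mem hi]
            have := List.length_pos_of_mem hi
            omega
          rw [ih (w - K + arr.getD i 0) (routine ++ [(i : Int)]) (visit.set i true)
              (by simpa using hlen) hlen2, herase]
          simp
        rw [List.map_congr_left hmap]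

lemma sum_filter_range (u : Nat) (p : Nat → Bool) (f : Nat → Int) :
    (((List.range u).filter p).map f).sum = ∑ x ∈ Finset.range u, if p x then f x else 0 := by
  induction u with
  | zero => simp
  | succ u ih =>
    rw [List.range_succ, List.filter_append, List.map_append, List.sum_append,
      Finset.sum_range_succ, ← ih]
    by_cases h : p u <;> simp [h]

lemma bitsFilter (u k j : Nat) (hj : k.testBit j = true) :
    (List.range u).filter (fun x => (k ^^^ 2 ^ j).testBit x)
      = ((List.range u).filter (fun x => k.testBit x)).filter (fun x => x != j) := by
  rw [List.filter_filter]
  apply List.filter_congr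
  intro x _
  by_cases hx : x = j
  · subst hx; simp [Nat.testBit_xor, Nat.testBit_two_pow, hj]
  · simp [Nat.testBit_xor, Nat.testBit_two_pow, hx, show j ≠ x from fun h => hx h.symm]

lemma xor_lt_self (k j : Nat) (hb : k.testBit j = true) : k ^^^ 2 ^ j < k := by
  apply Nat.lt_of_testBit j _ hb
  · intro x hx
    simp [Nat.testBit_xor, Nat.testBit_two_pow, show j ≠ x from Nat.ne_of_lt hx]
  · simp [Nat.testBit_xor, Nat.testBit_two_pow, hb]

lemma pc_eq (u : Nat) : ∀ k, k < 2 ^ u → popcount k = ((List.range u).filter (fun x => k.testBit x)).length := by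
  induction u with
  | zero =>
    intro k hk
    have : k = 0 := by omega
    subst this; simp [popcount]
  | succ u ih =>
    intro k hk
    by_cases h0 : k = 0
    · subst h0; simp [popcount, Nat.zero_testBit]
    · rw [popcount, if_neg h0, List.range_succ_eq_map, List.filter_cons, List.filter_map]
      have hpred : (fun x => k.testBit (Nat.succ x)) = (fun x => (k / 2).testBit x) := by
        funext x; exact Nat.testBit_add_one k x
      have hdiv : k / 2 < 2 ^ u := by
        have : 2 ^ (u + 1) = 2 ^ u * 2 := by ring
        omega
      have := ih (k / 2) hdiv
      by_cases hb : k.testBit 0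
      · have h1 : k % 2 = 1 := by
          have h := Nat.testBit_zero k; rw [h] at hb; simpa using hb
        simp only [hb, Nat.succ_eq_add_one]
        simp [Function.comp_def, hpred, ← this, h1]
        omega
      · have h1 : k % 2 = 0 := by
          have h := Nat.testBit_zero k; rw [h] at hb; simp at hb; omega
        simp only [hb, Nat.succ_eq_add_one]
        simp [Function.comp_def, hpred, ← this, h1]

lemma pc_le (u k : Nat) (hk : k < 2 ^ u) : popcount k ≤ u := by
  rw [pc_eq u k hk]
  simpa using List.length_filter_le (fun x => k.testBit x) (List.range u)

lemma pc_step (u k j : Nat) (hk : k < 2 ^ u) (hj : j < u) (hb : k.testBit j = true) :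
    popcount (k ^^^ 2 ^ j) + 1 = popcount k := by
  have hx2 : (2 : Nat) ^ j < 2 ^ u := Nat.pow_lt_pow_right (by omega) hj
  rw [pc_eq u k hk, pc_eq u _ (Nat.xor_lt_two_pow hk hx2), bitsFilter u k j hb]
  have hnd : ((List.range u).filter (fun x => k.testBit x)).Nodup := List.nodup_range.filter _
  have hmem : j ∈ (List.range u).filter (fun x => k.testBit x) :=
    List.mem_filter.2 ⟨List.mem_range.2 hj, hb⟩
  rw [← hnd.erase_eq_filter, List.length_erase_of_mem hmem]
  have := List.length_pos_of_mem hmem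
  omega

lemma wOf_step (arr : List Int) (K w0 : Int) (free : List Nat) (k j : Nat)
    (hj : j < free.length) (hb : k.testBit j = true) :
    wOf arr K w0 free (k ^^^ 2 ^ j) = wOf arr K w0 free k - K + arr.getD (free.getD j 0) 0 := by
  unfold wOf
  rw [sum_filter_range, sum_filter_range]
  have hjm : j ∈ Finset.range free.length := Finset.mem_range.2 hj
  rw [← Finset.add_sum_erase _ _ hjm, ← Finset.add_sum_erase _ (fun x =>
        if !k.testBit x then arr.getD (free.getD x 0) 0 - K else 0) hjm]
  have hcong : ∀ x ∈ (Finset.range free.length).erase j,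
      (if !(k ^^^ 2 ^ j).testBit x then arr.getD (free.getD x 0) 0 - K else 0)
        = (if !k.testBit x then arr.getD (free.getD x 0) 0 - K else 0) := by
    intro x hx
    have hxj : x ≠ j := (Finset.mem_erase.1 hx).1
    simp [Nat.testBit_xor, Nat.testBit_two_pow, show j ≠ x from fun h => hxj h.symm]
  rw [Finset.sum_congr rfl hcong]
  simp [Nat.testBit_xor, Nat.testBit_two_pow, hb]
  ring

lemma subOf_step (free : List Nat) (hnd : free.Nodup) (k j : Nat)
    (hj : j < free.length) (hb : k.testBit j = true) :
    subOf free (k ^^^ 2 ^ j) = (subOf free k).erase (free.getD j 0) := by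
  unfold subOf
  rw [bitsFilter _ k j hb]
  have hLnd : ((List.range free.length).filter (fun x => k.testBit x)).Nodup :=
    List.nodup_range.filter _
  have hLlt : ∀ x ∈ (List.range free.length).filter (fun x => k.testBit x), x < free.length :=
    fun x hx => List.mem_range.1 (List.mem_filter.1 hx).1
  have hinj : ∀ x ∈ (List.range free.length).filter (fun x => k.testBit x),
      ∀ y ∈ (List.range free.length).filter (fun x => k.testBit x),
      free.getD x 0 = free.getD y 0 → x = y := by
    intro x hx y hy hxy
    have hx' := hLlt x hx
    have hy' := hLlt y hy
    rw [List.getD_eq_getElem _ _ hx', List.getD_eq_getElem _ _ hy'] at hxy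
    exact (List.Nodup.getElem_inj_iff hnd).mp hxy
  have hmnd : (((List.range free.length).filter (fun x => k.testBit x)).map
      (fun x => free.getD x 0)).Nodup := (List.nodup_map_iff_inj_on hLnd).mpr hinj
  have hjL : j ∈ (List.range free.length).filter (fun x => k.testBit x) :=
    List.mem_filter.2 ⟨List.mem_range.2 hj, hb⟩
  rw [hmnd.erase_eq_filter, List.filter_map]
  congr 1
  apply List.filter_congr
  intro x hx
  by_cases hxj : x = j
  · subst hxj; simp
  · have hne : free.getD x 0 ≠ free.getD j 0 := fun hc => hxj (hinj x hx j hjL hc)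
    have hne' : free[x]?.getD 0 ≠ free[j]?.getD 0 := by simpa [List.getD] using hne
    rw [Bool.eq_iff_iff]
    simp [hxj, hne']

-- The fold step of port B's table loop (definitionally the lambda in get_total_helper_alt).
def stepB (arr : List Int) (K result w0 : Int) (m0 : Nat) (free : List Nat)
    (G : List Int) (mask : Nat) : List Int :=
  let w := wOf arr K w0 free mask
  let m := m0 + (free.length - popcount mask)
  let g : Int :=
    if w < 500 then 0
    else if m = arr.length then result + 1
    else result +
      (((List.range free.length).filter (fun j => mask.testBit j)).map
        (fun j => G.getD (mask ^^^ 2 ^ j) 0)).sum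
  G ++ [g]

lemma tbl_spec (arr : List Int) (K result w0 : Int) (m0 : Nat) (free : List Nat) (hnd : free.Nodup) :
    ∀ M, M ≤ 2 ^ free.length →
      (((List.range M).foldl (stepB arr K result w0 m0 free) []).length = M) ∧
      ∀ k, k < M →
        ((List.range M).foldl (stepB arr K result w0 m0 free) []).getD k 0
          = gSpec arr K result (wOf arr K w0 free k) (m0 + (free.length - popcount k)) (subOf free k) := by
  intro M
  induction M with
  | zero => intro _; exact ⟨rfl, fun k hk => absurd hk (by omega)⟩
  | succ M ih =>
    intro hM
    obtain ⟨ih1, ih2⟩ := ih (by omega)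
    have hMlt : M < 2 ^ free.length := by omega
    rw [List.range_succ, List.foldl_append, List.foldl_cons, List.foldl_nil]
    set T := (List.range M).foldl (stepB arr K result w0 m0 free) [] with hT
    have hentry : stepB arr K result w0 m0 free T M
        = T ++ [gSpec arr K result (wOf arr K w0 free M) (m0 + (free.length - popcount M)) (subOf free M)] := by
      unfold stepB
      by_cases h1 : wOf arr K w0 free M < 500
      · rw [gSpec]; simp [h1]
      · by_cases h2 : m0 + (free.length - popcount M) = arr.length
        · rw [gSpec]; simp [h1, h2]
        · simp only [if_neg h1, if_neg h2]
          rw [gSpec_of arr K result _ _ _ h1 h2]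
          have hmap : (((List.range free.length).filter (fun j => M.testBit j)).map
                (fun j => T.getD (M ^^^ 2 ^ j) 0))
              = ((subOf free M).map (fun i => gSpec arr K result (wOf arr K w0 free M - K + arr.getD i 0)
                  (m0 + (free.length - popcount M) + 1) ((subOf free M).erase i))) := by
            rw [subOf, List.map_map]
            apply List.map_congr_left
            intro j hj
            have hjlt : j < free.length := List.mem_range.1 (List.mem_filter.1 hj).1
            have hjb : M.testBit j = true := (List.mem_filter.1 hj).2
            have hlt : M ^^^ 2 ^ j < M := xor_lt_self M j hjb
            rw [ih2 (M ^^^ 2 ^ j) hlt, wOf_step arr K w0 free M j hjlt hjb,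
              subOf_step free hnd M j hjlt hjb]
            have hpc := pc_step free.length M j hMlt hjlt hjb
            have hle := pc_le free.length M hMlt
            have hm : m0 + (free.length - popcount (M ^^^ 2 ^ j))
                = m0 + (free.length - popcount M) + 1 := by omega
            rw [hm]
            rfl
          rw [hmap]
    rw [hentry]
    refine ⟨by simp [ih1], ?_⟩
    intro k hk
    by_cases hkM : k < M
    · rw [List.getD_append _ _ _ _ (by omega : k < T.length)]
      exact ih2 k hkM
    · have hkeq : k = M := by omega
      subst hkeq
      rw [show k = T.length by omega]
      simp [List.getD]

lemma alt_eq (arr : List Int) (K result cur_weight : Int) (cur_routine : List Int) (visit : List Bool)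
    (h1 : ¬ cur_weight < 500) (h2 : cur_routine.length ≠ arr.length) :
    get_total_helper_alt arr K result cur_weight cur_routine visit
      = gSpec arr K result cur_weight cur_routine.length (freeOf arr visit) := by
  rw [get_total_helper_alt, if_neg h1]
  simp only [if_neg h2]
  set free := (List.range arr.length).filter (fun i => !(visit.getD i true)) with hfree
  have hfreeOf : freeOf arr visit = free := rfl
  have hnd : free.Nodup := List.nodup_range.filter _
  set u := free.length with hu
  have hfold : (List.range (2 ^ u)).foldl
      (fun (G : List Int) mask =>
        let w := cur_weight +
          (((List.range u).filter (fun j => !(mask.testBit j))).map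
            (fun j => arr.getD (free.getD j 0) 0 - K)).sum
        let m := cur_routine.length + (u - popcount mask)
        let g : Int :=
          if w < 500 then 0
          else if m = arr.length then result + 1
          else result +
            (((List.range u).filter (fun j => mask.testBit j)).map
              (fun j => G.getD (mask ^^^ 2 ^ j) 0)).sum
        G ++ [g]) []
      = (List.range (2 ^ u)).foldl (stepB arr K result cur_weight cur_routine.length free) [] := rfl
  rw [hfold]
  obtain ⟨hl1, hval⟩ := tbl_spec arr K result cur_weight cur_routine.length free hnd (2 ^ u) (le_refl _)
  have hpos : 0 < 2 ^ u := Nat.pow_pos (by omega)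
  rw [hval (2 ^ u - 1) (by omega)]
  have hfull : ∀ x, x ∈ List.range u → (2 ^ u - 1).testBit x = true := by
    intro x hx
    rw [Nat.testBit_two_pow_sub_one]
    simpa using List.mem_range.1 hx
  have hwfull : wOf arr K cur_weight free (2 ^ u - 1) = cur_weight := by
    rw [wOf]
    have : (List.range u).filter (fun j => !((2 ^ u - 1).testBit j)) = [] := by
      rw [List.filter_eq_nil_iff]
      intro x hx
      simp [hfull x hx]
    rw [hu] at this ⊢
    rw [this]
    simp
  have hsubfull : subOf free (2 ^ u - 1) = free := by
    rw [subOf]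
    have : (List.range u).filter (fun j => (2 ^ u - 1).testBit j) = List.range u := by
      rw [List.filter_eq_self]
      intro x hx
      exact hfull x hx
    rw [hu] at this ⊢
    rw [this]
    apply List.ext_getElem (by simp)
    intro i hi1 hi2
    have hi : i < free.length := by simpa using hi1
    simp [List.getD, List.getElem?_eq_getElem hi]
  have hpcfull : popcount (2 ^ u - 1) = u := by
    rw [pc_eq u _ (by omega)]
    have : (List.range u).filter (fun x => (2 ^ u - 1).testBit x) = List.range u := by
      rw [List.filter_eq_self]
      intro x hx
      exact hfull x hx
    rw [this, List.length_range]
  rw [hwfull, hsubfull, hpcfull, hfreeOf]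
  rw [Nat.sub_self, Nat.add_zero]

-- ===== VERDICT (by name: the statement is the Claim_ definition above) =====
theorem get_total_helper_spec : Claim_equal_get_total_helper := by
  intro arr K result cur_weight cur_routine visit _ hPre
  unfold Spec_get_total_helper
  by_cases h1 : cur_weight < 500
  · rw [get_total_helper, goA, if_pos h1, get_total_helper_alt, if_pos h1]
  · by_cases h2 : cur_routine.length = arr.length
    · rw [get_total_helper, goA, if_neg h1, if_pos h2, get_total_helper_alt, if_neg h1]
      simp [h2]
    · have hlen : arr.length ≤ visit.length := by
        rcases hPre with h | h | h
        · exact h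
        · exact absurd h h1
        · exact absurd h h2
      have hfuel : (freeOf arr visit).length < arr.length + 1 := by
        have := List.length_filter_le (fun i => !(visit.getD i true)) (List.range arr.length)
        simpa [freeOf] using Nat.lt_succ_of_le (by simpa using this)
      rw [get_total_helper, goA_eq arr K result (arr.length + 1) cur_weight cur_routine visit hlen hfuel,
        alt_eq arr K result cur_weight cur_routine visit h1 h2]
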